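-- pv_equiv track=rewrite | github.com/strctlybusines1/projection | optimizer.py | _get_positions_needed
-- ===== SOURCE A (Python) =====
-- from typing import Dict, List, Optional, Tuple
-- from collections import defaultdict
--
-- def _get_positions_needed(lineup: List[Dict]) -> Dict[str, int]:
--     """Get remaining positions needed."""
--     filled = defaultdict(int)
--     for p in lineup:
--         slot = p.get('roster_slot', '')
--         if slot.startswith('C'):
--             filled['C'] += 1
--         elif slot.startswith('W'):
--             filled['W'] += 1
--         elif slot.startswith('D'):
--             filled['D'] += 1
--         elif slot == 'G':
--             filled['G'] += 1
--
--     return {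
--         'C': max(0, 2 - filled['C']),
--         'W': max(0, 3 - filled['W']),
--         'D': max(0, 2 - filled['D']),
--         'G': max(0, 1 - filled['G']),
--     }
-- ===== SOURCE B (Python) =====
-- from typing import Dict, List
--
-- _REQUIRED = {'C': 2, 'W': 3, 'D': 2, 'G': 1}
--
-- def _get_positions_needed(lineup: List[Dict]) -> Dict[str, int]:
--     """Get remaining positions needed."""
--     slots = [p.get('roster_slot', '') for p in lineup]
--     filled = {
--         'C': sum(1 for s in slots if s.startswith('C')),
--         'W': sum(1 for s in slots if s.startswith('W')),
--         'D': sum(1 for s in slots if s.startswith('D')),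
--         'G': sum(1 for s in slots if s == 'G'),
--     }
--     return {k: max(0, req - filled[k]) for k, req in _REQUIRED.items()}
-- ===== Notes on version B (the rewrite author's own statement) =====
-- stated objective: idiomatic
-- what changed: Replaces A's single branching defaultdict loop with a table of requirements and four independent filtered counts over the extracted slots, combined by a dict comprehension.
import Mathlib
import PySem

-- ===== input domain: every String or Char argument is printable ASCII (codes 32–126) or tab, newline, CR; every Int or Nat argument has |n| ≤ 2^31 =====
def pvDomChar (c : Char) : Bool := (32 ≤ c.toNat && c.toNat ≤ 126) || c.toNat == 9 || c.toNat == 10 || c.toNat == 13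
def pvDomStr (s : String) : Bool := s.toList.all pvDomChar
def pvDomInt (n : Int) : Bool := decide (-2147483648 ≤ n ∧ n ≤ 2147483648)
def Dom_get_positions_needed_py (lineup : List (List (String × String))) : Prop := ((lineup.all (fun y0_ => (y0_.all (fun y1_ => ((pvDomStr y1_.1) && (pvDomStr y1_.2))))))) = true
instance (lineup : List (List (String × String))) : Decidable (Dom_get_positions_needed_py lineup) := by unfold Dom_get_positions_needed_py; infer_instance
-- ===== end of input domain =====

-- ===== PORT A =====
-- B is a table-driven rewrite: independent filtered counts per slot kind instead of A's
-- single branching defaultdict pass (objective: idiomatic; same cost).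
def get_positions_needed_py (lineup : List (List (String × String))) : List (String × Int) :=
  let filled : PySem.Dict String Int := lineup.foldl (fun d p =>
    let slot := (List.lookup "roster_slot" p).getD ""
    if PySem.Str.startswith slot "C" then d.modify "C" 0 (· + 1)
    else if PySem.Str.startswith slot "W" then d.modify "W" 0 (· + 1)
    else if PySem.Str.startswith slot "D" then d.modify "D" 0 (· + 1)
    else if slot == "G" then d.modify "G" 0 (· + 1)
    else d) PySem.Dict.empty
  [("C", max 0 (2 - filled.getD "C" 0)),
   ("W", max 0 (3 - filled.getD "W" 0)),
   ("D", max 0 (2 - filled.getD "D" 0)),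
   ("G", max 0 (1 - filled.getD "G" 0))]

-- ===== PORT B =====
def pvRequired : List (String × Int) := [("C", 2), ("W", 3), ("D", 2), ("G", 1)]

def get_positions_needed_py_alt (lineup : List (List (String × String))) : List (String × Int) :=
  let slots := lineup.map (fun p => (List.lookup "roster_slot" p).getD "")
  let filled : List (String × Int) :=
    [("C", (slots.countP (fun s => PySem.Str.startswith s "C") : Int)),
     ("W", (slots.countP (fun s => PySem.Str.startswith s "W") : Int)),
     ("D", (slots.countP (fun s => PySem.Str.startswith s "D") : Int)),
     ("G", (slots.countP (fun s => s == "G") : Int))]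
  pvRequired.map (fun kr => (kr.1, max 0 (kr.2 - (filled.lookup kr.1).getD 0)))

-- ===== PRECONDITION & SPEC =====
def Spec_get_positions_needed_py (lineup : List (List (String × String))) (out : List (String × Int)) : Prop := out = get_positions_needed_py_alt lineup
instance (lineup : List (List (String × String))) (out : List (String × Int)) : Decidable (Spec_get_positions_needed_py lineup out) := by unfold Spec_get_positions_needed_py; infer_instance

-- ===== CLAIM (what is proved, stated in full; the proofs are below) =====
def Claim_equal_get_positions_needed_py : Prop := ∀ (lineup : List (List (String × String))), Dom_get_positions_needed_py lineup → Spec_get_positions_needed_py lineup (get_positions_needed_py lineup)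

-- ===== LEMMAS AND PROOFS =====

-- proof-only abbreviations for A's loop step
def pvSlot (p : List (String × String)) : String := (List.lookup "roster_slot" p).getD ""

def pvStep (d : PySem.Dict String Int) (p : List (String × String)) : PySem.Dict String Int :=
  if PySem.Str.startswith (pvSlot p) "C" then d.modify "C" 0 (· + 1)
  else if PySem.Str.startswith (pvSlot p) "W" then d.modify "W" 0 (· + 1)
  else if PySem.Str.startswith (pvSlot p) "D" then d.modify "D" 0 (· + 1)
  else if pvSlot p == "G" then d.modify "G" 0 (· + 1)
  else d

-- a string starting with one single-character prefix does not start with a different one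
theorem pv_sw_disj (l : List Char) (a b : Char) (hab : a ≠ b)
    (h : PySem.Chars.startswith l [a] = true) : PySem.Chars.startswith l [b] = false := by
  rw [PySem.Chars.startswith_iff] at h
  rw [Bool.eq_false_iff, Ne, PySem.Chars.startswith_iff]
  obtain ⟨t, ht⟩ := h
  rintro ⟨u, hu⟩
  rw [← ht] at hu
  simp at hu
  exact hab hu.1.symm

-- a string starting with a non-'G' character is not the string "G"
theorem pv_sw_ne_G (s : String) (a : Char) (ha : a ≠ 'G')
    (h : PySem.Chars.startswith s.toList [a] = true) : (s == "G") = false := by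
  rw [Bool.eq_false_iff, Ne, beq_iff_eq]
  rintro rfl
  rw [PySem.Chars.startswith_iff] at h
  obtain ⟨t, ht⟩ := h
  have hg : "G".toList = ['G'] := rfl
  rw [hg] at ht
  simp at ht
  exact ha ht.1

-- one loop step changes exactly the entry of the branch that fires
theorem pv_step_getD (d : PySem.Dict String Int) (p : List (String × String)) :
    ((pvStep d p).getD "C" 0 = d.getD "C" 0 + (if PySem.Str.startswith (pvSlot p) "C" then (1 : Int) else 0)) ∧
    ((pvStep d p).getD "W" 0 = d.getD "W" 0 + (if PySem.Str.startswith (pvSlot p) "W" then (1 : Int) else 0)) ∧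
    ((pvStep d p).getD "D" 0 = d.getD "D" 0 + (if PySem.Str.startswith (pvSlot p) "D" then (1 : Int) else 0)) ∧
    ((pvStep d p).getD "G" 0 = d.getD "G" 0 + (if pvSlot p == "G" then (1 : Int) else 0)) := by
  by_cases h1 : PySem.Str.startswith (pvSlot p) "C" = true
  · have hW : PySem.Str.startswith (pvSlot p) "W" = false := by
      have := pv_sw_disj (pvSlot p).toList 'C' 'W' (by decide) (by simpa using h1)
      simpa using this
    have hD : PySem.Str.startswith (pvSlot p) "D" = false := by
      have := pv_sw_disj (pvSlot p).toList 'C' 'D' (by decide) (by simpa using h1)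
      simpa using this
    have hG : (pvSlot p == "G") = false := pv_sw_ne_G _ 'C' (by decide) (by simpa using h1)
    simp at h1 hW hD
    simp [pvStep, h1, hW, hD, hG, PySem.Dict.getD_modify]
  · by_cases h2 : PySem.Str.startswith (pvSlot p) "W" = true
    · have hD : PySem.Str.startswith (pvSlot p) "D" = false := by
        have := pv_sw_disj (pvSlot p).toList 'W' 'D' (by decide) (by simpa using h2)
        simpa using this
      have hG : (pvSlot p == "G") = false := pv_sw_ne_G _ 'W' (by decide) (by simpa using h2)
      simp at h1 h2 hD
      simp [pvStep, h1, h2, hD, hG, PySem.Dict.getD_modify]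
    · by_cases h3 : PySem.Str.startswith (pvSlot p) "D" = true
      · have hG : (pvSlot p == "G") = false := pv_sw_ne_G _ 'D' (by decide) (by simpa using h3)
        simp at h1 h2 h3
        simp [pvStep, h1, h2, h3, hG, PySem.Dict.getD_modify]
      · by_cases h4 : (pvSlot p == "G") = true
        · simp at h1 h2 h3
          simp [pvStep, h1, h2, h3, h4, PySem.Dict.getD_modify]
        · simp at h1 h2 h3 h4
          simp [pvStep, h1, h2, h3, h4]

theorem pv_fold_getD_gen (l : List (List (String × String))) (d : PySem.Dict String Int) :
    ((l.foldl pvStep d).getD "C" 0 = d.getD "C" 0 + ((l.map pvSlot).countP (fun s => PySem.Str.startswith s "C") : Int)) ∧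
    ((l.foldl pvStep d).getD "W" 0 = d.getD "W" 0 + ((l.map pvSlot).countP (fun s => PySem.Str.startswith s "W") : Int)) ∧
    ((l.foldl pvStep d).getD "D" 0 = d.getD "D" 0 + ((l.map pvSlot).countP (fun s => PySem.Str.startswith s "D") : Int)) ∧
    ((l.foldl pvStep d).getD "G" 0 = d.getD "G" 0 + ((l.map pvSlot).countP (fun s => s == "G") : Int)) := by
  induction l generalizing d with
  | nil => simp
  | cons p t ih =>
    simp only [List.foldl_cons, List.map_cons, List.countP_cons]
    obtain ⟨iC, iW, iD, iG⟩ := ih (pvStep d p)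
    obtain ⟨sC, sW, sD, sG⟩ := pv_step_getD d p
    simp [List.countP_map] at iC iW iD iG sC sW sD sG ⊢
    refine ⟨?_, ?_, ?_, ?_⟩
    · rw [iC, sC]; by_cases h : PySem.Chars.startswith (pvSlot p).toList ['C'] = true <;>
        simp [h] <;> omega
    · rw [iW, sW]; by_cases h : PySem.Chars.startswith (pvSlot p).toList ['W'] = true <;>
        simp [h] <;> omega
    · rw [iD, sD]; by_cases h : PySem.Chars.startswith (pvSlot p).toList ['D'] = true <;>
        simp [h] <;> omega
    · rw [iG, sG]; by_cases h : pvSlot p = "G" <;>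
        simp [h] <;> omega

-- ===== VERDICT (by name: the statement is the Claim_ definition above) =====
theorem get_positions_needed_py_spec : Claim_equal_get_positions_needed_py := by
  intro lineup _
  unfold Spec_get_positions_needed_py get_positions_needed_py get_positions_needed_py_alt
  have h := pv_fold_getD_gen lineup PySem.Dict.empty
  obtain ⟨hC, hW, hD, hG⟩ := h
  unfold pvStep pvSlot at hC hW hD hG
  simp [List.countP_map] at hC hW hD hG
  simp [pvRequired, List.countP_map, List.lookup, hC, hW, hD, hG]
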